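-- pv_equiv track=rewrite | github.com/77svene/axiom | axiom/parser.py | _tags_compatible
-- ===== SOURCE A (Python) =====
-- def _tags_compatible(tag1: str, tag2: str) -> bool:
--     """Check if two tags are semantically compatible."""
--     compatible_groups = [
--         {'div', 'section', 'article', 'main', 'aside'},
--         {'span', 'a', 'em', 'strong', 'b', 'i'},
--         {'ul', 'ol', 'nav'},
--         {'h1', 'h2', 'h3', 'h4', 'h5', 'h6'},
--     ]
--
--     for group in compatible_groups:
--         if tag1 in group and tag2 in group:
--             return True
--
--     return False
-- ===== SOURCE B (Python) =====
-- _GROUPS = (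
--     ('div', 'section', 'article', 'main', 'aside'),
--     ('span', 'a', 'em', 'strong', 'b', 'i'),
--     ('ul', 'ol', 'nav'),
--     ('h1', 'h2', 'h3', 'h4', 'h5', 'h6'),
-- )
-- _TAG_GROUP = {tag: i for i, group in enumerate(_GROUPS) for tag in group}
--
--
-- def _tags_compatible(tag1: str, tag2: str) -> bool:
--     """Check if two tags are semantically compatible."""
--     g1 = _TAG_GROUP.get(tag1)
--     return g1 is not None and g1 == _TAG_GROUP.get(tag2)
-- ===== Notes on version B (the rewrite author's own statement) =====
-- stated objective: idiomatic
-- what changed: Replaces the loop over groups with double membership tests by a tag-to-group-index dict built once at module load; the function becomes two lookups and an index comparison.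
import Mathlib
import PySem

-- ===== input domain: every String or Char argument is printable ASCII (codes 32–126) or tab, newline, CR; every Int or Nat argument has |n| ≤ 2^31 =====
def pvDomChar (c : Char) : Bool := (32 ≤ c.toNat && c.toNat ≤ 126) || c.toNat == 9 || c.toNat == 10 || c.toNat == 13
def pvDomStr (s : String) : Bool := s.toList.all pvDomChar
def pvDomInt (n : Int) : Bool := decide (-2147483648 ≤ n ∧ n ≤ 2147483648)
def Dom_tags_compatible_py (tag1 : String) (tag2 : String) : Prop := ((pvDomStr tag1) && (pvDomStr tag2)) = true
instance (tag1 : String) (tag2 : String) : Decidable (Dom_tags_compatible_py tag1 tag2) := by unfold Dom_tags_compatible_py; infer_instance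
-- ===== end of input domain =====

-- B replaces A's loop over groups with double membership tests by a tag→group-index
-- dict built once; each call is two lookups and an index comparison (objective: idiomatic).

-- ===== PORT A =====
-- A's list of compatible groups (Python sets), in source order.
def pvGroupsA : List (PySem.Set String) :=
  [PySem.Set.ofList ["div","section","article","main","aside"],
   PySem.Set.ofList ["span","a","em","strong","b","i"],
   PySem.Set.ofList ["ul","ol","nav"],
   PySem.Set.ofList ["h1","h2","h3","h4","h5","h6"]]

-- A's 'for group in compatible_groups: if tag1 in group and tag2 in group: return True'.
def pvLoopA (tag1 tag2 : String) : List (PySem.Set String) → Bool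
  | [] => false
  | g :: rest =>
      if PySem.Set.contains g tag1 && PySem.Set.contains g tag2 then true
      else pvLoopA tag1 tag2 rest

def tags_compatible_py (tag1 : String) (tag2 : String) : Bool :=
  pvLoopA tag1 tag2 pvGroupsA

-- ===== PORT B =====
-- B's _GROUPS tuples.
def pvGroupsB : List (List String) :=
  [["div","section","article","main","aside"],
   ["span","a","em","strong","b","i"],
   ["ul","ol","nav"],
   ["h1","h2","h3","h4","h5","h6"]]

-- B's dict comprehension {tag: i for i, group in enumerate(_GROUPS) for tag in group}.
def pvTagGroup : PySem.Dict String Int :=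
  (PySem.List.enumerate pvGroupsB).foldl
    (fun d p => p.2.foldl (fun d tag => d.insert tag p.1) d) PySem.Dict.empty

-- B's 'g1 = _TAG_GROUP.get(tag1); return g1 is not None and g1 == _TAG_GROUP.get(tag2)'.
def tags_compatible_py_alt (tag1 : String) (tag2 : String) : Bool :=
  match PySem.Dict.get? pvTagGroup tag1 with
  | none => false
  | some g1 => PySem.Dict.get? pvTagGroup tag2 == some g1

-- ===== PRECONDITION & SPEC =====
def Spec_tags_compatible_py (tag1 : String) (tag2 : String) (out : Bool) : Prop := out = tags_compatible_py_alt tag1 tag2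
instance (tag1 : String) (tag2 : String) (out : Bool) : Decidable (Spec_tags_compatible_py tag1 tag2 out) := by unfold Spec_tags_compatible_py; infer_instance

-- ===== CLAIM (what is proved, stated in full; the proofs are below) =====
def Claim_equal_tags_compatible_py : Prop := ∀ (tag1 : String) (tag2 : String), Dom_tags_compatible_py tag1 tag2 → Spec_tags_compatible_py tag1 tag2 (tags_compatible_py tag1 tag2)

-- ===== LEMMAS AND PROOFS =====

-- all tags occurring in the groups, in order
def pvAllTags : List String :=
  ["div","section","article","main","aside","span","a","em","strong","b","i",
   "ul","ol","nav","h1","h2","h3","h4","h5","h6"]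

-- the dict B builds, as a literal
lemma pvTagGroup_eq : pvTagGroup = PySem.Dict.mk
  [("div",0),("section",0),("article",0),("main",0),("aside",0),
   ("span",1),("a",1),("em",1),("strong",1),("b",1),("i",1),
   ("ul",2),("ol",2),("nav",2),
   ("h1",3),("h2",3),("h3",3),("h4",3),("h5",3),("h6",3)] := by decide

lemma pvA_false_left (t1 t2 : String) (h : t1 ∉ pvAllTags) :
    tags_compatible_py t1 t2 = false := by
  simp [pvAllTags] at h
  obtain ⟨h1,h2,h3,h4,h5,h6,h7,h8,h9,h10,h11,h12,h13,h14,h15,h16,h17,h18,h19,h20⟩ := h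
  simp [tags_compatible_py, pvLoopA, pvGroupsA, PySem.Set.contains, PySem.Set.ofList,
    h1,h2,h3,h4,h5,h6,h7,h8,h9,h10,h11,h12,h13,h14,h15,h16,h17,h18,h19,h20]

lemma pvA_false_right (t1 t2 : String) (h : t2 ∉ pvAllTags) :
    tags_compatible_py t1 t2 = false := by
  simp [pvAllTags] at h
  obtain ⟨h1,h2,h3,h4,h5,h6,h7,h8,h9,h10,h11,h12,h13,h14,h15,h16,h17,h18,h19,h20⟩ := h
  simp [tags_compatible_py, pvLoopA, pvGroupsA, PySem.Set.contains, PySem.Set.ofList,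
    h1,h2,h3,h4,h5,h6,h7,h8,h9,h10,h11,h12,h13,h14,h15,h16,h17,h18,h19,h20]

lemma pvB_get_none (t : String) (h : t ∉ pvAllTags) :
    PySem.Dict.get? pvTagGroup t = none := by
  simp [pvAllTags] at h
  obtain ⟨h1,h2,h3,h4,h5,h6,h7,h8,h9,h10,h11,h12,h13,h14,h15,h16,h17,h18,h19,h20⟩ := h
  rw [pvTagGroup_eq]
  simp [PySem.Dict.get?]
  exact ⟨Ne.symm h1, Ne.symm h2, Ne.symm h3, Ne.symm h4, Ne.symm h5, Ne.symm h6,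
    Ne.symm h7, Ne.symm h8, Ne.symm h9, Ne.symm h10, Ne.symm h11, Ne.symm h12,
    Ne.symm h13, Ne.symm h14, Ne.symm h15, Ne.symm h16, Ne.symm h17, Ne.symm h18,
    Ne.symm h19, Ne.symm h20⟩

lemma pvB_false_left (t1 t2 : String) (h : t1 ∉ pvAllTags) :
    tags_compatible_py_alt t1 t2 = false := by
  simp [tags_compatible_py_alt, pvB_get_none t1 h]

lemma pvB_false_right (t1 t2 : String) (h : t2 ∉ pvAllTags) :
    tags_compatible_py_alt t1 t2 = false := by
  unfold tags_compatible_py_alt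
  cases PySem.Dict.get? pvTagGroup t1 with
  | none => rfl
  | some g1 => simp [pvB_get_none t2 h]

-- ===== VERDICT (by name: the statement is the Claim_ definition above) =====
set_option maxHeartbeats 2000000 in
theorem tags_compatible_py_spec : Claim_equal_tags_compatible_py := by
  intro t1 t2 _
  unfold Spec_tags_compatible_py
  by_cases h1 : t1 ∈ pvAllTags
  · by_cases h2 : t2 ∈ pvAllTags
    · fin_cases h1 <;> fin_cases h2 <;> decide
    · rw [pvA_false_right t1 t2 h2, pvB_false_right t1 t2 h2]
  · rw [pvA_false_left t1 t2 h1, pvB_false_left t1 t2 h1]
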